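-- pv_equiv track=rewrite | github.com/ilyes-smaouii/advent_of_code_2024 | scripts/day_09.py | disk_map_to_ranges_rep
-- ===== SOURCE A (Python) =====
-- POINT_REP = -1
--
-- def get_blocks_rep(disk_map) :
--   blocks = []
--   curr_id = 0
--   is_empty = False
--   for i in range(0, len(disk_map)) :
--     if not is_empty :
--       blocks += [curr_id] * disk_map[i]
--       curr_id += 1
--     else :
--       blocks += [POINT_REP] * disk_map[i]
--     is_empty = not is_empty
--   return blocks
--
-- def disk_map_to_ranges_rep(disk_map) :
--   blocks_rep = get_blocks_rep(disk_map) + [POINT_REP]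
--   file_ranges = []
--   empty_ranges = []
--   last_idx = 0
--   last_cell = blocks_rep[last_idx]
--   for i in range(len(blocks_rep)) :
--     curr_cell = blocks_rep[i]
--     if curr_cell != last_cell :
--       if last_cell == POINT_REP :
--         # (range_size, range_position, range_content)
--         empty_ranges.append((i - last_idx, last_idx, POINT_REP))
--       else :
--         # (range_size, range_position, range_content)
--         file_ranges.append((i - last_idx, last_idx, last_cell))
--       last_idx = i
--       last_cell = blocks_rep[last_idx]
--   return file_ranges, empty_ranges
-- ===== SOURCE B (Python) =====
-- def disk_map_to_ranges_rep(disk_map):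
--     # Single pass over disk_map, two slots (file, empty) per stride, with running
--     # positions and a pending coalesced empty-run start; no block expansion.
--     file_ranges = []
--     empty_ranges = []
--     fapp = file_ranges.append
--     eapp = empty_ranges.append
--     pos = 0
--     empty_start = None
--     it = iter(disk_map)
--     fid = 0
--     for fsize in it:
--         if fsize > 0:
--             if empty_start is not None:
--                 eapp((pos - empty_start, empty_start, -1))
--                 empty_start = None
--             fapp((fsize, pos, fid))
--             pos += fsize
--         fid += 1
--         esize = next(it, None)
--         if esize is None:
--             break
--         if esize > 0:
--             if empty_start is None:
--                 empty_start = pos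
--             pos += esize
--     # a trailing empty run is never emitted
--     return file_ranges, empty_ranges
-- ===== Notes on version B (the rewrite author's own statement) =====
-- stated objective: faster
-- what changed: Instead of expanding every digit into per-block lists and run-length rescanning the expanded list, B makes a single pass over disk_map (one stride per file/empty slot pair) with running positions and a pending coalesced empty-run start, emitting ranges directly without block expansion.
import Mathlib
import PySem

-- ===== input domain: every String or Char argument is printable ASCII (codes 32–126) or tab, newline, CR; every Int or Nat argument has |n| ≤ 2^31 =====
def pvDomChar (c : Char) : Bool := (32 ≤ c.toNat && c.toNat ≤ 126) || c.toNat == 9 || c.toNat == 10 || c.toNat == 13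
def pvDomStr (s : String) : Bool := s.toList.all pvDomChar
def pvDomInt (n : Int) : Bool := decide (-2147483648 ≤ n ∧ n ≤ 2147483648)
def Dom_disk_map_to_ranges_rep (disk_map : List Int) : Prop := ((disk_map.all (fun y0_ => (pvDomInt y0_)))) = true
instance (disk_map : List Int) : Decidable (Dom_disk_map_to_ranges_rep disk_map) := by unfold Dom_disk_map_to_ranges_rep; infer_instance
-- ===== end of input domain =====

-- B replaces A's block-by-block expansion and run-length rescan with a single pass
-- over disk_map using running positions (faster: no expansion of the digit sizes).

-- ===== PORT A =====
def POINT_REP : Int := -1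

-- the loop of get_blocks_rep: state (blocks, curr_id, is_empty)
def pvBlocksGo : List Int → List Int → Int → Bool → List Int
  | [], blocks, _, _ => blocks
  | n :: rest, blocks, curr_id, is_empty =>
    if !is_empty then
      pvBlocksGo rest (blocks ++ List.replicate n.toNat curr_id) (curr_id + 1) (!is_empty)
    else
      pvBlocksGo rest (blocks ++ List.replicate n.toNat POINT_REP) curr_id (!is_empty)

def get_blocks_rep (disk_map : List Int) : List Int :=
  pvBlocksGo disk_map [] 0 false

-- the scan loop of disk_map_to_ranges_rep: state (file_ranges, empty_ranges, last_idx, last_cell), i the loop index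
def pvScanA : List Int → List (Int × Int × Int) → List (Int × Int × Int) → Int → Int → Int →
    (List (Int × Int × Int)) × (List (Int × Int × Int))
  | [], fr, er, _, _, _ => (fr, er)
  | curr :: rest, fr, er, last_idx, last_cell, i =>
    if curr ≠ last_cell then
      if last_cell = POINT_REP then
        pvScanA rest fr (er ++ [(i - last_idx, last_idx, POINT_REP)]) i curr (i + 1)
      else
        pvScanA rest (fr ++ [(i - last_idx, last_idx, last_cell)]) er i curr (i + 1)
    else
      pvScanA rest fr er last_idx last_cell (i + 1)

def disk_map_to_ranges_rep (disk_map : List Int) : (List (Int × Int × Int)) × (List (Int × Int × Int)) :=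
  let blocks_rep := get_blocks_rep disk_map ++ [POINT_REP]
  pvScanA blocks_rep [] [] 0 (PySem.List.pyGetD blocks_rep 0 0) 0

-- ===== PORT B =====
-- the file-slot body of B's loop: maybe flush the pending empty run and emit the file range
def pvFileStep (fsize : Int) (fr er : List (Int × Int × Int)) (pos : Int) (empty_start : Option Int)
    (fid : Int) : List (Int × Int × Int) × List (Int × Int × Int) × Int × Option Int :=
  if 0 < fsize then
    (fr ++ [(fsize, pos, fid)],
     er ++ (match empty_start with | some s => [(pos - s, s, -1)] | none => []),
     pos + fsize, none)
  else (fr, er, pos, empty_start)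

-- B's loop: one stride per (file slot, empty slot) pair; the iterator may stop after a file slot
def pvScanB : List Int → List (Int × Int × Int) → List (Int × Int × Int) → Int → Option Int → Int →
    (List (Int × Int × Int)) × (List (Int × Int × Int))
  | [], fr, er, _, _, _ => (fr, er)
  | [fsize], fr, er, pos, empty_start, fid =>
    let (fr', er', _, _) := pvFileStep fsize fr er pos empty_start fid
    (fr', er')
  | fsize :: esize :: rest, fr, er, pos, empty_start, fid =>
    let (fr', er', pos', es') := pvFileStep fsize fr er pos empty_start fid
    if 0 < esize then pvScanB rest fr' er' (pos' + esize) (some (es'.getD pos')) (fid + 1)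
    else pvScanB rest fr' er' pos' es' (fid + 1)

def disk_map_to_ranges_rep_alt (disk_map : List Int) : (List (Int × Int × Int)) × (List (Int × Int × Int)) :=
  pvScanB disk_map [] [] 0 none 0

-- ===== PRECONDITION & SPEC =====
def Spec_disk_map_to_ranges_rep (disk_map : List Int) (out : (List (Int × Int × Int)) × (List (Int × Int × Int))) : Prop := out = disk_map_to_ranges_rep_alt disk_map
instance (disk_map : List Int) (out : (List (Int × Int × Int)) × (List (Int × Int × Int))) : Decidable (Spec_disk_map_to_ranges_rep disk_map out) := by unfold Spec_disk_map_to_ranges_rep; infer_instance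

-- ===== CLAIM (what is proved, stated in full; the proofs are below) =====
def Claim_equal_disk_map_to_ranges_rep : Prop := ∀ (disk_map : List Int), Dom_disk_map_to_ranges_rep disk_map → Spec_disk_map_to_ranges_rep disk_map (disk_map_to_ranges_rep disk_map)

-- ===== LEMMAS AND PROOFS =====

-- proof-only helper: the same single pass taken one slot at a time (slot index i)
def pvScanC : List Int → List (Int × Int × Int) → List (Int × Int × Int) → Int → Option Int → Nat →
    (List (Int × Int × Int)) × (List (Int × Int × Int))
  | [], fr, er, _, _, _ => (fr, er)
  | size :: rest, fr, er, pos, empty_start, i =>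
    let n := max size 0
    if n = 0 then pvScanC rest fr er pos empty_start (i + 1)
    else if i % 2 = 0 then
      pvScanC rest (fr ++ [(n, pos, ((i / 2 : Nat) : Int))])
        (er ++ (match empty_start with | some s => [(pos - s, s, -1)] | none => []))
        (pos + n) none (i + 1)
    else
      pvScanC rest fr er (pos + n) (some (empty_start.getD pos)) (i + 1)


-- the block list produced for the suffix of disk_map starting at slot index i
def pvChunks : List Int → Nat → List Int
  | [], _ => []
  | n :: rest, i =>
    List.replicate n.toNat (if i % 2 = 0 then ((i / 2 : Nat) : Int) else -1) ++ pvChunks rest (i + 1)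

-- small-step equations for the three loops
theorem pvChunks_even {n : Int} {rest : List Int} {i : Nat} (hp : i % 2 = 0) :
    pvChunks (n :: rest) i = List.replicate n.toNat ((i / 2 : Nat) : Int) ++ pvChunks rest (i + 1) := by
  simp [pvChunks, hp]

theorem pvChunks_odd {n : Int} {rest : List Int} {i : Nat} (hp : ¬ i % 2 = 0) :
    pvChunks (n :: rest) i = List.replicate n.toNat (-1) ++ pvChunks rest (i + 1) := by
  simp [pvChunks, hp]

theorem pvBlocksGo_false (n : Int) (rest : List Int) (acc : List Int) (c : Int) :
    pvBlocksGo (n :: rest) acc c false = pvBlocksGo rest (acc ++ List.replicate n.toNat c) (c + 1) true := rfl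

theorem pvBlocksGo_true (n : Int) (rest : List Int) (acc : List Int) (c : Int) :
    pvBlocksGo (n :: rest) acc c true = pvBlocksGo rest (acc ++ List.replicate n.toNat (-1)) c false := rfl

theorem pvScanA_eq {curr last : Int} (rest : List Int) (fr er : List (Int × Int × Int)) (s i : Int)
    (h : curr = last) :
    pvScanA (curr :: rest) fr er s last i = pvScanA rest fr er s last (i + 1) := by
  simp [pvScanA, h]

theorem pvScanA_flush_empty {curr : Int} (rest : List Int) (fr er : List (Int × Int × Int)) (s i : Int)
    (h : curr ≠ -1) :
    pvScanA (curr :: rest) fr er s (-1) i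
      = pvScanA rest fr (er ++ [(i - s, s, -1)]) i curr (i + 1) := by
  simp [pvScanA, POINT_REP, h]

theorem pvScanA_flush_file {curr last : Int} (rest : List Int) (fr er : List (Int × Int × Int)) (s i : Int)
    (hl : last ≠ -1) (h : curr ≠ last) :
    pvScanA (curr :: rest) fr er s last i
      = pvScanA rest (fr ++ [(i - s, s, last)]) er i curr (i + 1) := by
  simp [pvScanA, POINT_REP, h, hl]

theorem pvScanC_zero {size : Int} (rest : List Int) (fr er : List (Int × Int × Int)) (pos : Int)
    (es : Option Int) (i : Nat) (h : max size 0 = 0) :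
    pvScanC (size :: rest) fr er pos es i = pvScanC rest fr er pos es (i + 1) := by
  simp [pvScanC, h]

theorem pvScanC_even {size : Int} (rest : List Int) (fr er : List (Int × Int × Int)) (pos : Int)
    (es : Option Int) (i : Nat) (h : ¬ max size 0 = 0) (hp : i % 2 = 0) :
    pvScanC (size :: rest) fr er pos es i
      = pvScanC rest (fr ++ [(max size 0, pos, ((i / 2 : Nat) : Int))])
          (er ++ (match es with | some s => [(pos - s, s, -1)] | none => [])) (pos + max size 0) none (i + 1) := by
  simp only [pvScanC, h, hp, if_false, if_true]

theorem pvScanC_odd {size : Int} (rest : List Int) (fr er : List (Int × Int × Int)) (pos : Int)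
    (es : Option Int) (i : Nat) (h : ¬ max size 0 = 0) (hp : ¬ i % 2 = 0) :
    pvScanC (size :: rest) fr er pos es i
      = pvScanC rest fr er (pos + max size 0) (some (es.getD pos)) (i + 1) := by
  simp only [pvScanC, h, hp, if_false]

theorem pvBlocksGo_chunks (l : List Int) : ∀ (acc : List Int) (i : Nat),
    pvBlocksGo l acc (((i + 1) / 2 : Nat) : Int) (decide (i % 2 = 1)) = acc ++ pvChunks l i := by
  induction l with
  | nil => intro acc i; simp [pvBlocksGo, pvChunks]
  | cons n rest ih =>
    intro acc i
    rcases Nat.even_or_odd i with ⟨k, hk⟩ | ⟨k, hk⟩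
    · subst hk
      rw [show (decide ((k + k) % 2 = 1)) = false from decide_eq_false (by omega),
        pvBlocksGo_false, pvChunks_even (by omega),
        show ((k + k + 1) / 2 : Nat) = (k + k) / 2 from by omega]
      have := ih (acc ++ List.replicate n.toNat (((k + k) / 2 : Nat) : Int)) (k + k + 1)
      rw [show ((k + k + 1 + 1) / 2 : Nat) = (k + k) / 2 + 1 from by omega,
        show (decide ((k + k + 1) % 2 = 1)) = true from decide_eq_true (by omega),
        Nat.cast_add, Nat.cast_one] at this
      rw [this, List.append_assoc]
    · subst hk
      rw [show (decide ((2 * k + 1) % 2 = 1)) = true from decide_eq_true (by omega),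
        pvBlocksGo_true, pvChunks_odd (by omega)]
      have := ih (acc ++ List.replicate n.toNat (-1)) (2 * k + 1 + 1)
      rw [show ((2 * k + 1 + 1 + 1) / 2 : Nat) = (2 * k + 1 + 1) / 2 from by omega,
        show (decide ((2 * k + 1 + 1) % 2 = 1)) = false from decide_eq_false (by omega)] at this
      rw [show ((2 * k + 1 + 1) / 2 : Nat) = (2 * k + 1) / 2 + 1 from by omega] at this ⊢
      rw [this, List.append_assoc]

-- consuming a replicate of the pending run's cell just advances the index
theorem pvScanA_replicate (k : Nat) : ∀ (bs : List Int) (fr er : List (Int × Int × Int)) (s v p : Int),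
    pvScanA (List.replicate k v ++ bs) fr er s v p = pvScanA bs fr er s v (p + k) := by
  induction k with
  | zero => intro bs fr er s v p; simp
  | succ k ih =>
    intro bs fr er s v p
    rw [List.replicate_succ, List.cons_append, pvScanA_eq _ _ _ _ _ rfl, ih,
      show p + 1 + (k : Int) = p + ((k + 1 : Nat) : Int) from by push_cast; ring]

-- joint simulation: pending empty run (left) / pending file run already emitted by B (right)
theorem pvEF (l : List Int) : ∀ (i : Nat) (fr er : List (Int × Int × Int)) (s p : Int),
    (pvScanA (pvChunks l i ++ [-1]) fr er s (-1) p = pvScanC l fr er p (some s) i) ∧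
    (∀ v : Int, 0 ≤ v → 2 * v < (i : Int) →
      pvScanA (pvChunks l i ++ [-1]) fr er s v p
        = pvScanC l (fr ++ [(p - s, s, v)]) er p none i) := by
  induction l with
  | nil =>
    intro i fr er s p
    constructor
    · simp [pvChunks, pvScanA, pvScanC]
    · intro v hv0 hvi
      rw [pvChunks, List.nil_append,
        pvScanA_flush_file _ _ _ _ _ (by omega) (by omega)]
      simp [pvScanA, pvScanC]
  | cons n rest ih =>
    intro i fr er s p
    have hnat : n.toNat = 0 ∨ ∃ k, n.toNat = k + 1 := by
      cases h : n.toNat with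
      | zero => exact Or.inl rfl
      | succ k => exact Or.inr ⟨k, rfl⟩
    constructor
    · -- pending empty run
      rcases hnat with h0 | ⟨k, hk⟩
      · have hmax : max n 0 = 0 := max_eq_right (by omega)
        rw [pvScanC_zero _ _ _ _ _ _ hmax]
        by_cases hpar : i % 2 = 0
        · rw [pvChunks_even hpar, h0, List.replicate_zero, List.nil_append]
          exact (ih (i + 1) fr er s p).1
        · rw [pvChunks_odd hpar, h0, List.replicate_zero, List.nil_append]
          exact (ih (i + 1) fr er s p).1
      · have hn : n = (k : Int) + 1 := by omega
        have hmax : max n 0 = (k : Int) + 1 := by rw [hn]; exact max_eq_left (by positivity)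
        by_cases hpar : i % 2 = 0
        · -- file chunk: A flushes the empty run then runs through the file blocks
          rw [pvChunks_even hpar, hk, List.append_assoc, List.replicate_succ, List.cons_append,
            pvScanA_flush_empty _ _ _ _ _ (by omega), pvScanA_replicate,
            ((ih (i + 1) fr (er ++ [(p - s, s, -1)]) p (p + 1 + k)).2
              ((i / 2 : Nat) : Int) (by omega) (by omega)),
            pvScanC_even _ _ _ _ _ _ (by rw [hmax]; omega) hpar, hmax,
            show (p + 1 + (k : Int)) - p = (k : Int) + 1 from by ring,
            show p + ((k : Int) + 1) = p + 1 + (k : Int) from by ring]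
        · -- empty chunk: merged into the pending run
          rw [pvChunks_odd hpar, hk, List.append_assoc, List.replicate_succ, List.cons_append,
            pvScanA_eq _ _ _ _ _ rfl, pvScanA_replicate,
            (ih (i + 1) fr er s (p + 1 + k)).1,
            pvScanC_odd _ _ _ _ _ _ (by rw [hmax]; omega) hpar, hmax,
            show p + ((k : Int) + 1) = p + 1 + (k : Int) from by ring]
          rfl
    · -- pending file run (B has already emitted it)
      intro v hv0 hvi
      rcases hnat with h0 | ⟨k, hk⟩
      · have hmax : max n 0 = 0 := max_eq_right (by omega)
        rw [pvScanC_zero _ _ _ _ _ _ hmax]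
        by_cases hpar : i % 2 = 0
        · rw [pvChunks_even hpar, h0, List.replicate_zero, List.nil_append]
          exact (ih (i + 1) fr er s p).2 v hv0 (by push_cast; omega)
        · rw [pvChunks_odd hpar, h0, List.replicate_zero, List.nil_append]
          exact (ih (i + 1) fr er s p).2 v hv0 (by push_cast; omega)
      · have hn : n = (k : Int) + 1 := by omega
        have hmax : max n 0 = (k : Int) + 1 := by rw [hn]; exact max_eq_left (by positivity)
        by_cases hpar : i % 2 = 0
        · -- next is a file chunk with a strictly larger id: A flushes v's run
          have hwv : (((i / 2 : Nat) : Int)) ≠ v := by omega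
          rw [pvChunks_even hpar, hk, List.append_assoc, List.replicate_succ, List.cons_append,
            pvScanA_flush_file _ _ _ _ _ (by omega) hwv, pvScanA_replicate,
            ((ih (i + 1) (fr ++ [(p - s, s, v)]) er p (p + 1 + k)).2
              ((i / 2 : Nat) : Int) (by omega) (by omega)),
            pvScanC_even _ _ _ _ _ _ (by rw [hmax]; omega) hpar, hmax,
            show (p + 1 + (k : Int)) - p = (k : Int) + 1 from by ring,
            show p + ((k : Int) + 1) = p + 1 + (k : Int) from by ring]
          simp
        · -- next is an empty chunk: A flushes v's run and starts an empty run
          rw [pvChunks_odd hpar, hk, List.append_assoc, List.replicate_succ, List.cons_append,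
            pvScanA_flush_file _ _ _ _ _ (by omega) (by omega), pvScanA_replicate,
            (ih (i + 1) (fr ++ [(p - s, s, v)]) er p (p + 1 + k)).1,
            pvScanC_odd _ _ _ _ _ _ (by rw [hmax]; omega) hpar, hmax,
            show p + ((k : Int) + 1) = p + 1 + (k : Int) from by ring]
          rfl

theorem pvGetD_cons (v : Int) (bs : List Int) : PySem.List.pyGetD (v :: bs) 0 0 = v := by
  simp [PySem.List.pyGetD, PySem.List.pyGet?, PySem.List.pyIdx?]

-- the start: nothing consumed yet, A's last_cell is the head of blocks_rep
theorem pvStart (l : List Int) : ∀ (i : Nat),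
    pvScanA (pvChunks l i ++ [-1]) [] [] 0
      (PySem.List.pyGetD (pvChunks l i ++ [-1]) 0 0) 0
      = pvScanC l [] [] 0 none i := by
  induction l with
  | nil => intro i; simp [pvChunks, pvScanA, pvScanC]
  | cons n rest ih =>
    intro i
    have hnat : n.toNat = 0 ∨ ∃ k, n.toNat = k + 1 := by
      cases h : n.toNat with
      | zero => exact Or.inl rfl
      | succ k => exact Or.inr ⟨k, rfl⟩
    rcases hnat with h0 | ⟨k, hk⟩
    · have hmax : max n 0 = 0 := max_eq_right (by omega)
      rw [pvScanC_zero _ _ _ _ _ _ hmax, ← ih (i + 1)]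
      by_cases hpar : i % 2 = 0
      · rw [pvChunks_even hpar, h0, List.replicate_zero, List.nil_append]
      · rw [pvChunks_odd hpar, h0, List.replicate_zero, List.nil_append]
    · have hn : n = (k : Int) + 1 := by omega
      have hmax : max n 0 = (k : Int) + 1 := by rw [hn]; exact max_eq_left (by positivity)
      by_cases hpar : i % 2 = 0
      · rw [pvChunks_even hpar, hk, List.append_assoc, List.replicate_succ, List.cons_append,
          pvGetD_cons, pvScanA_eq _ _ _ _ _ rfl, pvScanA_replicate,
          ((pvEF rest (i + 1) [] [] 0 (0 + 1 + k)).2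
            ((i / 2 : Nat) : Int) (by omega) (by omega)),
          pvScanC_even _ _ _ _ _ _ (by rw [hmax]; omega) hpar, hmax,
          show ((0 : Int) + 1 + (k : Int)) - 0 = (k : Int) + 1 from by ring,
          show (0 : Int) + ((k : Int) + 1) = 0 + 1 + (k : Int) from by ring]
        simp
      · rw [pvChunks_odd hpar, hk, List.append_assoc, List.replicate_succ, List.cons_append,
          pvGetD_cons, pvScanA_eq _ _ _ _ _ rfl, pvScanA_replicate,
          (pvEF rest (i + 1) [] [] 0 (0 + 1 + k)).1,
          pvScanC_odd _ _ _ _ _ _ (by rw [hmax]; omega) hpar, hmax,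
          show (0 : Int) + ((k : Int) + 1) = 0 + 1 + (k : Int) from by ring]
        rfl

-- the per-slot scan starting at an even slot index is the pairwise scan
theorem pvBridge : ∀ (n : Nat) (l : List Int), l.length ≤ n →
    ∀ (fr er : List (Int × Int × Int)) (pos : Int) (es : Option Int) (f : Nat),
      pvScanC l fr er pos es (2 * f) = pvScanB l fr er pos es (f : Int) := by
  intro n
  induction n with
  | zero =>
    intro l hl fr er pos es f
    have hnil : l = [] := List.length_eq_zero_iff.mp (by omega)
    subst hnil; rfl
  | succ n ih =>
    intro l hl fr er pos es f
    match l with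
    | [] => rfl
    | [fsize] =>
      by_cases h : 0 < fsize
      · have hmax : max fsize 0 = fsize := max_eq_left (by omega)
        rw [pvScanC_even _ _ _ _ _ _ (by omega) (by omega), hmax]
        simp [pvScanB, pvFileStep, h, pvScanC]
      · have hmax : max fsize 0 = 0 := max_eq_right (by omega)
        rw [pvScanC_zero _ _ _ _ _ _ hmax]
        simp [pvScanB, pvFileStep, h, pvScanC]
    | fsize :: esize :: rest =>
      have hrest : rest.length ≤ n := by simp at hl; omega
      have hstep : ∀ (fr' er' : List (Int × Int × Int)) (pos' : Int) (es' : Option Int),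
          pvScanC (esize :: rest) fr' er' pos' es' (2 * f + 1)
            = (if 0 < esize then pvScanB rest fr' er' (pos' + esize) (some (es'.getD pos')) ((f : Int) + 1)
               else pvScanB rest fr' er' pos' es' ((f : Int) + 1)) := by
        intro fr' er' pos' es'
        by_cases he : 0 < esize
        · have hmaxe : max esize 0 = esize := max_eq_left (by omega)
          rw [pvScanC_odd _ _ _ _ _ _ (by omega) (by omega), hmaxe, if_pos he,
            show 2 * f + 1 + 1 = 2 * (f + 1) from by omega,
            ih rest hrest, Nat.cast_add, Nat.cast_one]
        · have hmaxe : max esize 0 = 0 := max_eq_right (by omega)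
          rw [pvScanC_zero _ _ _ _ _ _ hmaxe, if_neg he,
            show 2 * f + 1 + 1 = 2 * (f + 1) from by omega,
            ih rest hrest, Nat.cast_add, Nat.cast_one]
      by_cases h : 0 < fsize
      · have hmax : max fsize 0 = fsize := max_eq_left (by omega)
        rw [pvScanC_even _ _ _ _ _ _ (by omega) (by omega), hmax,
          Nat.mul_div_cancel_left _ (by omega), hstep]
        simp [pvScanB, pvFileStep, h]
      · have hmax : max fsize 0 = 0 := max_eq_right (by omega)
        rw [pvScanC_zero _ _ _ _ _ _ hmax, hstep]
        simp [pvScanB, pvFileStep, h]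

-- ===== VERDICT (by name: the statement is the Claim_ definition above) =====
theorem disk_map_to_ranges_rep_spec : Claim_equal_disk_map_to_ranges_rep := by
  intro dm _
  unfold Spec_disk_map_to_ranges_rep disk_map_to_ranges_rep disk_map_to_ranges_rep_alt get_blocks_rep
  have hb : pvBlocksGo dm [] 0 false = pvChunks dm 0 := by
    have := pvBlocksGo_chunks dm [] 0
    simpa using this
  simp only [POINT_REP, hb]
  rw [pvStart dm 0, show (0 : Nat) = 2 * 0 from rfl, pvBridge dm.length dm le_rfl]
  norm_num
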